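-- pv_equiv track=rewrite | github.com/Taara-Sinh-Aatrey/Contests | Placement/Practice/sol.py | convertMarks
-- ===== SOURCE A (Python) =====
-- def convertMarks(marks):
--   Grades = dict()
--   for person, mark in marks.items():
--       grades = dict()
--       for subject, score in mark.items():
--           if score > 90:
--               grades[subject] = 'A'
--           elif score > 80:
--               grades[subject] = 'B'
--           elif score > 70:
--               grades[subject] = 'C'
--           elif score > 60:
--               grades[subject] = 'D'
--           elif score > 50:
--               grades[subject] = 'E+'
--           elif score > 40:
--               grades[subject] = 'E'
--           else:
--               grades[subject] = 'F'
--       Grades[person] = grades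
--   return Grades
-- ===== SOURCE B (Python) =====
-- _THRESHOLDS = [40, 50, 60, 70, 80, 90]
-- _LABELS = ['F', 'E', 'E+', 'D', 'C', 'B', 'A']
--
-- def _bisect_left(a, x):
--     lo, hi = 0, len(a)
--     while lo < hi:
--         mid = (lo + hi) // 2
--         if a[mid] < x:
--             lo = mid + 1
--         else:
--             hi = mid
--     return lo
--
-- def convertMarks(marks):
--     return {person: {subject: _LABELS[_bisect_left(_THRESHOLDS, score)]
--                      for subject, score in mark.items()}
--             for person, mark in marks.items()}
-- ===== Notes on version B (the rewrite author's own statement) =====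
-- stated objective: idiomatic
-- what changed: The 7-way if/elif cascade is replaced by a threshold table looked up with a hand-written bisect_left binary search, and the explicit dict-building loops become dict comprehensions.
import Mathlib
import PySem

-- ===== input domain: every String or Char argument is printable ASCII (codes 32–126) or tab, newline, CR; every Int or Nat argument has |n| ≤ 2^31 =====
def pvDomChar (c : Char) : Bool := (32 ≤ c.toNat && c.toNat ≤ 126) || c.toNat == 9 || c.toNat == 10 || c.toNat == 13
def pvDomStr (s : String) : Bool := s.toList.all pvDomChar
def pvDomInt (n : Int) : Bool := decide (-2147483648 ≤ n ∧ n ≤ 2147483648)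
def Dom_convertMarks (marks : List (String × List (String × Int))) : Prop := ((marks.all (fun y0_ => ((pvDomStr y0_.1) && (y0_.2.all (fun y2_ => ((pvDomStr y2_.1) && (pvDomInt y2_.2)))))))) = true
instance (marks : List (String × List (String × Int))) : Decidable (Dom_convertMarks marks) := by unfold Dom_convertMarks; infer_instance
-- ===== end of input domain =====

-- B replaces A's 7-way if/elif cascade by a threshold table consulted with a hand-written
-- binary search (bisect_left), and builds the dicts with comprehensions (idiomatic; same cost).


-- ===== PORT A =====
-- the if/elif cascade of A, on one score
def gradeCascade (score : Int) : String :=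
  if score > 90 then "A"
  else if score > 80 then "B"
  else if score > 70 then "C"
  else if score > 60 then "D"
  else if score > 50 then "E+"
  else if score > 40 then "E"
  else "F"

-- A iterates over the dicts `marks` / `mark` (the Lean argument is the dict's item list,
-- so each is PySem.Dict.ofList of its list) and builds nested dicts by insertion.
def convertMarks (marks : List (String × List (String × Int))) : List (String × List (String × String)) :=
  ((PySem.Dict.ofList marks).items.foldl
    (fun Grades pm =>
      Grades.insert pm.1
        (((PySem.Dict.ofList pm.2).items.foldl
            (fun grades ss => grades.insert ss.1 (gradeCascade ss.2))
            PySem.Dict.empty).items))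
    PySem.Dict.empty).items

-- ===== PORT B =====
def pvThresholds : List Int := [40, 50, 60, 70, 80, 90]
def pvLabels : List String := ["F", "E", "E+", "D", "C", "B", "A"]

-- hand-written bisect_left from Source B, step for step (a[mid] is always in range: lo ≤ mid < hi ≤ len a)
def bisectLeft (a : List Int) (x : Int) (lo hi : Nat) : Nat :=
  if _h : lo < hi then
    let mid := (lo + hi) / 2
    if a.getD mid 0 < x then bisectLeft a x (mid + 1) hi
    else bisectLeft a x lo mid
  else lo
termination_by hi - lo
decreasing_by all_goals omega

def gradeTable (score : Int) : String :=
  pvLabels.getD (bisectLeft pvThresholds score 0 6) ""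

-- B's dict comprehensions iterate the items of a dict, whose keys are distinct, so each
-- comprehension is exactly a map over those items (no key is ever overwritten).
def convertMarks_alt (marks : List (String × List (String × Int))) : List (String × List (String × String)) :=
  (PySem.Dict.ofList marks).items.map
    (fun pm => (pm.1, (PySem.Dict.ofList pm.2).items.map (fun ss => (ss.1, gradeTable ss.2))))

-- ===== PRECONDITION & SPEC =====
def Spec_convertMarks (marks : List (String × List (String × Int))) (out : List (String × List (String × String))) : Prop := out = convertMarks_alt marks
instance (marks : List (String × List (String × Int))) (out : List (String × List (String × String))) : Decidable (Spec_convertMarks marks out) := by unfold Spec_convertMarks; infer_instance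

-- ===== CLAIM (what is proved, stated in full; the proofs are below) =====
def Claim_equal_convertMarks : Prop := ∀ (marks : List (String × List (String × Int))), Dom_convertMarks marks → Spec_convertMarks marks (convertMarks marks)

-- ===== LEMMAS AND PROOFS =====

-- the binary search over the fixed 6-entry table computes the same letter as the cascade
lemma gradeTable_eq_cascade (x : Int) : gradeTable x = gradeCascade x := by
  unfold gradeTable gradeCascade pvLabels pvThresholds
  simp [bisectLeft, List.getD]
  split_ifs <;> first | rfl | omega

-- inserting a list of pairs with distinct keys into an empty dict yields exactly that list,
-- with the values rewritten by the loop body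
lemma items_insert_loop {ν : Type} (l : List (String × ν)) (f : String × ν → ν')
    (hnd : (l.map (·.1)).Nodup) :
    (l.foldl (fun d p => d.insert p.1 (f p)) PySem.Dict.empty).items
      = l.map (fun p => (p.1, f p)) := by
  have := PySem.Dict.items_foldl_insert_fresh (l := l) (k := (·.1)) (v := f)
    (d := PySem.Dict.empty) (by intro a _; simp [PySem.Dict.contains_empty]) hnd
  simpa [PySem.Dict.empty] using this

lemma nodup_fst_items {ν : Type} (l : List (String × ν)) :
    ((PySem.Dict.ofList l).items.map (·.1)).Nodup :=
  PySem.Dict.nodup_keys_ofList l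

-- ===== VERDICT (by name: the statement is the Claim_ definition above) =====
theorem convertMarks_spec : Claim_equal_convertMarks := by
  intro marks _
  unfold Spec_convertMarks convertMarks convertMarks_alt
  rw [items_insert_loop _ _ (nodup_fst_items marks)]
  apply List.map_congr_left
  intro pm _
  rw [items_insert_loop _ _ (nodup_fst_items pm.2)]
  simp [gradeTable_eq_cascade]
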